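-- pv_equiv track=rewrite | github.com/BorisKin1957/My_Stepic | 3_cyfry_goda_2.py | triada
-- ===== SOURCE A (Python) =====
-- def triada(year):
--     count = 0
--     w = str(year)
--     for i in range(len(w)):
--         for j in range(i + 1, len(w)):
--             if w[i] == w[j]:
--                 count += 1
--     if count >= 3:
--         return True
-- ===== SOURCE B (Python) =====
-- def triada(year):
--     w = str(year)
--     total = 0
--     for c in set(w):
--         n = w.count(c)
--         total += n * (n - 1) // 2
--     if total >= 3:
--         return True
-- ===== Notes on version B (the rewrite author's own statement) =====
-- stated objective: simpler
-- what changed: Replaces the quadratic nested index-pair comparison with a single frequency pass: for each distinct character c of str(year) it adds C(count(c),2), since the number of equal index pairs equals the sum of per-character binomial pair counts; the implicit None below the threshold is kept.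
import Mathlib
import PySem

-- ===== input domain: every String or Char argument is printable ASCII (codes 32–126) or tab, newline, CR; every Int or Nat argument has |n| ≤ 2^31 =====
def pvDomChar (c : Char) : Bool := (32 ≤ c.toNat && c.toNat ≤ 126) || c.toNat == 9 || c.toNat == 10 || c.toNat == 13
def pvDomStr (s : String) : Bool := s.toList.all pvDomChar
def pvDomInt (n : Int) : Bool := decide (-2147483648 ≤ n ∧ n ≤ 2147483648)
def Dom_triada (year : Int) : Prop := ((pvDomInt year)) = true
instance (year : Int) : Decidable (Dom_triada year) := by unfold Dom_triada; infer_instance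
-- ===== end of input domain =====

-- B replaces A's nested pairwise index comparison by one frequency pass: sum of C(count(c),2)
-- over the distinct characters of str(year); same implicit None below the threshold (simpler).

-- ===== PORT A =====
def triada (year : Int) : Option Bool :=
  let w := (PySem.Int.toStr year).toList
  let count : Int := (PySem.List.pyRange 0 (w.length : Int) 1).foldl (fun acc i =>
      (PySem.List.pyRange (i + 1) (w.length : Int) 1).foldl (fun acc2 j =>
        if PySem.List.pyGetD w i ' ' == PySem.List.pyGetD w j ' ' then acc2 + 1 else acc2) acc) 0
  if count ≥ 3 then some true else none

-- ===== PORT B =====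
def triada_alt (year : Int) : Option Bool :=
  let w := (PySem.Int.toStr year).toList
  let total : Int := (PySem.Set.ofList w).foldl (fun acc c =>
      let n : Int := (w.count c : Int)
      acc + PySem.Int.floordiv (n * (n - 1)) 2) 0
  if total ≥ 3 then some true else none

-- ===== PRECONDITION & SPEC =====
def Spec_triada (year : Int) (out : Option Bool) : Prop := out = triada_alt year
instance (year : Int) (out : Option Bool) : Decidable (Spec_triada year out) := by unfold Spec_triada; infer_instance

-- ===== CLAIM (what is proved, stated in full; the proofs are below) =====
def Claim_equal_triada : Prop := ∀ (year : Int), Dom_triada year → Spec_triada year (triada year)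

-- ===== LEMMAS AND PROOFS =====

/-- Number of equal index pairs (i < j) in a list of characters. -/
def pairs : List Char → Nat
  | [] => 0
  | c :: t => t.count c + pairs t

lemma C2_succ (n : Nat) : (n + 1) * n / 2 = n * (n - 1) / 2 + n := by
  cases n with
  | zero => rfl
  | succ m =>
      have h : (m + 1 + 1) * (m + 1) = (m + 1) * m + 2 * (m + 1) := by ring
      rw [h, Nat.add_mul_div_left _ _ (by norm_num : (0:Nat) < 2)]
      simp

lemma floordiv_C2 (n : Nat) :
    PySem.Int.floordiv ((n : Int) * ((n : Int) - 1)) 2 = ((n * (n - 1) / 2 : Nat) : Int) := by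
  cases n with
  | zero => decide
  | succ m =>
      have h : ((m + 1 : Nat) : Int) * (((m + 1 : Nat) : Int) - 1) = (((m + 1) * m : Nat) : Int) := by
        push_cast; ring
      rw [h]
      have h2 := PySem.Int.floordiv_natCast ((m + 1) * m) 2
      simpa using h2

lemma sum_map_natCast {α : Type} (f : α → Nat) (xs : List α) :
    (xs.map (fun a => ((f a : Nat) : Int))).sum = (((xs.map f).sum : Nat) : Int) := by
  induction xs with
  | nil => simp
  | cons x t ih => simp [ih]

lemma foldl_count_flip (v : Char) : ∀ (xs : List Char) (a : Int),
    xs.foldl (fun acc x => if v == x then acc + 1 else acc) a = a + (xs.count v : Int)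
  | [], a => by simp
  | x :: t, a => by
      by_cases h : v = x
      · subst h
        simp only [List.foldl_cons, beq_self_eq_true, if_true]
        rw [foldl_count_flip v t (a + 1), List.count_cons_self]
        push_cast; ring
      · have hb : (v == x) = false := by simp [h]
        have hc : List.count v (x :: t) = List.count v t :=
          List.count_cons_of_ne (fun e => h e.symm)
        simp only [List.foldl_cons, hb, Bool.false_eq_true, if_false]
        rw [foldl_count_flip v t a, hc]

lemma sum_range_counts : ∀ l : List Char,
    ((List.range l.length).map (fun k => (l.drop (k + 1)).count (l.getD k ' '))).sum = pairs l
  | [] => by simp [pairs]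
  | c :: t => by
      rw [List.length_cons, List.range_succ_eq_map, List.map_cons, List.map_map, List.sum_cons]
      have hhead : ((c :: t).drop (0 + 1)).count ((c :: t).getD 0 ' ') = t.count c := by simp
      have htail : (List.range t.length).map
          ((fun k => ((c :: t).drop (k + 1)).count ((c :: t).getD k ' ')) ∘ Nat.succ)
          = (List.range t.length).map (fun k => (t.drop (k + 1)).count (t.getD k ' ')) := by
        apply List.map_congr_left
        intro k _
        show ((c :: t).drop (k + 1 + 1)).count ((c :: t).getD (k + 1) ' ')
            = (t.drop (k + 1)).count (t.getD k ' ')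
        rw [List.drop_succ_cons, List.getD_cons_succ]
      rw [hhead, htail, sum_range_counts t]
      rfl

lemma sum_map_update {s : List Char} (hs : s.Nodup) {c : Char} (hc : c ∈ s)
    (f g : Char → Nat) (k : Nat) (h1 : f c = g c + k) (h2 : ∀ x ∈ s, x ≠ c → f x = g x) :
    (s.map f).sum = (s.map g).sum + k := by
  induction s with
  | nil => cases hc
  | cons a t ih =>
      rcases List.mem_cons.mp hc with rfl | hct
      · have hnotc : c ∉ t := (List.nodup_cons.mp hs).1
        have ht : t.map f = t.map g := by
          apply List.map_congr_left
          intro x hx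
          exact h2 x (List.mem_cons_of_mem _ hx) (by rintro rfl; exact hnotc hx)
        simp only [List.map_cons, List.sum_cons, ht, h1]
        omega
      · have ha : f a = g a := by
          apply h2 a (List.mem_cons_self)
          rintro rfl; exact (List.nodup_cons.mp hs).1 hct
        have := ih (List.nodup_cons.mp hs).2 hct
          (fun x hx hxc => h2 x (List.mem_cons_of_mem _ hx) hxc)
        simp only [List.map_cons, List.sum_cons, ha, this]
        omega

lemma sum_C2 : ∀ (l s : List Char), s.Nodup → (∀ x ∈ l, x ∈ s) →
    (s.map (fun c => l.count c * (l.count c - 1) / 2)).sum = pairs l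
  | [], s, _, _ => by simp [pairs]
  | c :: t, s, hs, hmem => by
      have hc : c ∈ s := hmem c List.mem_cons_self
      have step := sum_map_update hs hc
        (fun x => (c :: t).count x * ((c :: t).count x - 1) / 2)
        (fun x => t.count x * (t.count x - 1) / 2)
        (t.count c)
        (by simp only [List.count_cons_self]; exact C2_succ (t.count c))
        (by intro x _ hx
            have : List.count x (c :: t) = List.count x t :=
              List.count_cons_of_ne (fun e => hx e.symm)
            simp only [this])
      rw [step, sum_C2 t s hs (fun x hx => hmem x (List.mem_cons_of_mem _ hx))]
      show pairs t + t.count c = t.count c + pairs t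
      omega

lemma A_count (l : List Char) :
    (PySem.List.pyRange 0 (l.length : Int) 1).foldl (fun acc i =>
      (PySem.List.pyRange (i + 1) (l.length : Int) 1).foldl (fun acc2 j =>
        if PySem.List.pyGetD l i ' ' == PySem.List.pyGetD l j ' ' then acc2 + 1 else acc2) acc)
      (0 : Int) = (pairs l : Int) := by
  have hinner : ∀ (acc : Int) (i : Int), i ∈ PySem.List.pyRange 0 (l.length : Int) 1 →
      (PySem.List.pyRange (i + 1) (l.length : Int) 1).foldl (fun acc2 j =>
        if PySem.List.pyGetD l i ' ' == PySem.List.pyGetD l j ' ' then acc2 + 1 else acc2) acc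
      = acc + ((l.drop (i + 1).toNat).count (PySem.List.pyGetD l i ' ') : Int) := by
    intro acc i hi
    have h0 : (0 : Int) ≤ i := ((PySem.List.mem_pyRange_one).mp hi).1
    rw [PySem.List.foldl_pyRange_pyGetD' l ' '
      (fun acc2 x => if PySem.List.pyGetD l i ' ' == x then acc2 + 1 else acc2) acc (by omega)]
    exact foldl_count_flip _ _ _
  rw [PySem.List.foldl_congr_mem _ _
      (fun acc i => acc + ((l.drop (i + 1).toNat).count (PySem.List.pyGetD l i ' ') : Int)) _
      (fun acc i hi => hinner acc i hi)]
  rw [PySem.List.foldl_add _ (fun i => ((l.drop (i + 1).toNat).count (PySem.List.pyGetD l i ' ') : Int)) 0]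
  rw [PySem.List.pyRange_zero_natCast, List.map_map, zero_add]
  have h : (List.range l.length).map
      ((fun i => ((l.drop (i + 1).toNat).count (PySem.List.pyGetD l i ' ') : Int)) ∘ (fun k : Nat => (k : Int)))
      = (List.range l.length).map (fun k => (((l.drop (k + 1)).count (l.getD k ' ') : Nat) : Int)) := by
    apply List.map_congr_left
    intro k _
    simp [Function.comp, PySem.List.pyGetD_natCast]
  rw [h, sum_map_natCast, sum_range_counts]

lemma B_total (l : List Char) :
    (PySem.Set.ofList l).foldl (fun acc c =>
      let n : Int := (l.count c : Int)
      acc + PySem.Int.floordiv (n * (n - 1)) 2) 0 = (pairs l : Int) := by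
  show (PySem.Set.ofList l).foldl (fun acc c =>
      acc + PySem.Int.floordiv ((l.count c : Int) * ((l.count c : Int) - 1)) 2) 0 = (pairs l : Int)
  rw [PySem.List.foldl_add _ (fun c =>
    PySem.Int.floordiv ((l.count c : Int) * ((l.count c : Int) - 1)) 2) 0]
  rw [zero_add]
  have h : (PySem.Set.ofList l).map (fun c =>
      PySem.Int.floordiv ((l.count c : Int) * ((l.count c : Int) - 1)) 2)
      = (PySem.Set.ofList l).map (fun c => ((l.count c * (l.count c - 1) / 2 : Nat) : Int)) := by
    apply List.map_congr_left
    intro c _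
    exact floordiv_C2 (l.count c)
  rw [h, sum_map_natCast,
    sum_C2 l (PySem.Set.ofList l) (PySem.Set.nodup_ofList l)
      (fun x hx => (PySem.Set.mem_ofList l x).mpr hx)]

-- ===== VERDICT (by name: the statement is the Claim_ definition above) =====
theorem triada_spec : Claim_equal_triada := by
  intro year _
  unfold Spec_triada triada triada_alt
  show (if ((PySem.List.pyRange 0 (((PySem.Int.toStr year).toList).length : Int) 1).foldl (fun acc i =>
      (PySem.List.pyRange (i + 1) (((PySem.Int.toStr year).toList).length : Int) 1).foldl (fun acc2 j =>
        if PySem.List.pyGetD ((PySem.Int.toStr year).toList) i ' ' == PySem.List.pyGetD ((PySem.Int.toStr year).toList) j ' ' then acc2 + 1 else acc2) acc) (0 : Int)) ≥ 3 then some true else none)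
    = (if ((PySem.Set.ofList ((PySem.Int.toStr year).toList)).foldl (fun acc c =>
        acc + PySem.Int.floordiv (((((PySem.Int.toStr year).toList).count c : Int)) * ((((PySem.Int.toStr year).toList).count c : Int) - 1)) 2) (0 : Int)) ≥ 3 then some true else none)
  rw [A_count, B_total]
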